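-- pv_equiv track=rewrite | github.com/melodist/CodingPractice | src/Baekjoon/1074_Z.py | solve
-- ===== SOURCE A (Python) =====
-- def solve(n, r, c):
--     if r < 0 or c < 0:
--         return 0
--
--     if n == 1:
--         return r * 2 + c
--
--     x = 0
--     if r >= 2**(n-1):
--         x += 2
--         r -= 2**(n-1)
--     if c >= 2**(n-1):
--         x += 1
--         c -= 2**(n-1)
--
--     return x * 2**(2*(n-1)) + solve(n-1, r, c)
-- ===== SOURCE B (Python) =====
-- def solve(n, r, c):
--     if r < 0 or c < 0:
--         return 0
--     res = 0
--     for level in range(n, 1, -1):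
--         half = 2 ** (level - 1)
--         x = 0
--         if r >= half:
--             x += 2
--             r -= half
--         if c >= half:
--             x += 1
--             c -= half
--         res += x * 4 ** (level - 1)
--     return res + r * 2 + c
-- ===== Notes on version B (the rewrite author's own statement) =====
-- stated objective: simpler
-- what changed: Replaces A's recursion with a single explicit countdown loop accumulating the quadrant index per level, adding the leftover r*2+c once at the end.
import Mathlib
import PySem

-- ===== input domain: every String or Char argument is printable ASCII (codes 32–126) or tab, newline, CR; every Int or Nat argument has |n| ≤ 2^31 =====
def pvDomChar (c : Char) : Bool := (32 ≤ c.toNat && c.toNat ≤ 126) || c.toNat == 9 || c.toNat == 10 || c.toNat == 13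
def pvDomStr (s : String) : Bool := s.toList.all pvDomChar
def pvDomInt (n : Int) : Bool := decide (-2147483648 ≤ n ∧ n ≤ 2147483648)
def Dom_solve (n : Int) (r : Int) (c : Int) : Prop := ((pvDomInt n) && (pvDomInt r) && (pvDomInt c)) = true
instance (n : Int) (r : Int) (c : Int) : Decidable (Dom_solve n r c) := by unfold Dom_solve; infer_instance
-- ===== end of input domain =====

-- B replaces A's recursion with one explicit countdown loop accumulating the quadrant index
-- per level and adding the leftover r*2+c once at the end (objective: simpler).

-- ===== PORT A =====
-- Literal port of A's recursion. The 'n ≤ 1' branch is a totality guard only: there the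
-- Python recursion never reaches its base case and raises RecursionError (outside Pre_solve).
def solve (n : Int) (r : Int) (c : Int) : Int :=
  if r < 0 ∨ c < 0 then 0
  else if n = 1 then r * 2 + c
  else if n ≤ 1 then 0
  else
    let h : Int := 2 ^ (n - 1).toNat
    let p : Int × Int := if r ≥ h then (2, r - h) else (0, r)
    let q : Int × Int := if c ≥ h then (p.1 + 1, c - h) else (p.1, c)
    q.1 * 2 ^ (2 * (n - 1)).toNat + solve (n - 1) p.2 q.2
termination_by n.toNat
decreasing_by omega

-- ===== PORT B =====
-- loop body of Source B: state (res, r, c), one level per iteration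
def stepB (st : Int × Int × Int) (level : Int) : Int × Int × Int :=
  let half : Int := 2 ^ (level - 1).toNat
  let a : Int × Int := if st.2.1 ≥ half then (2, st.2.1 - half) else (0, st.2.1)
  let b : Int × Int := if st.2.2 ≥ half then (a.1 + 1, st.2.2 - half) else (a.1, st.2.2)
  (st.1 + b.1 * 4 ^ (level - 1).toNat, a.2, b.2)

def solve_alt (n : Int) (r : Int) (c : Int) : Int :=
  if r < 0 ∨ c < 0 then 0
  else
    let st := (PySem.List.pyRange n 1 (-1)).foldl stepB (0, r, c)
    st.1 + st.2.1 * 2 + st.2.2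

-- ===== PRECONDITION & SPEC =====
-- Pre_ excludes exactly the inputs where A raises RecursionError: n ≤ 0 with r ≥ 0 and c ≥ 0
-- (the recursion then never reaches its 'n == 1' base case).
def Pre_solve (n : Int) (r : Int) (c : Int) : Prop := 1 ≤ n ∨ r < 0 ∨ c < 0
instance (n : Int) (r : Int) (c : Int) : Decidable (Pre_solve n r c) := by
  unfold Pre_solve; infer_instance

def pvWitness_solve : Int × Int × Int := (2, 3, 1)

def Spec_solve (n : Int) (r : Int) (c : Int) (out : Int) : Prop := out = solve_alt n r c
instance (n : Int) (r : Int) (c : Int) (out : Int) : Decidable (Spec_solve n r c out) := by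
  unfold Spec_solve; infer_instance

-- ===== CLAIM =====
def Claim_equal_solve : Prop := ∀ (n : Int) (r : Int) (c : Int), Dom_solve n r c → Pre_solve n r c → Spec_solve n r c (solve n r c)

-- ===== LEMMAS AND PROOFS =====

-- the accumulator of stepB is purely additive: a nonzero initial res just shifts the result
lemma foldl_stepB_shift (l : List Int) (res r c : Int) :
    l.foldl stepB (res, r, c) =
      (res + (l.foldl stepB (0, r, c)).1,
       (l.foldl stepB (0, r, c)).2.1, (l.foldl stepB (0, r, c)).2.2) := by
  induction l generalizing res r c with
  | nil => simp
  | cons a l ih =>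
    simp only [List.foldl_cons]
    rw [show stepB (res, r, c) a =
        ((stepB (0, r, c) a).1 + res, (stepB (0, r, c) a).2.1, (stepB (0, r, c) a).2.2) by
      simp only [stepB]; split_ifs <;> simp <;> try ring]
    rw [ih, ih ((stepB (0, r, c) a).1)]
    rcases stepB (0, r, c) a with ⟨s1, s2, s3⟩
    simp; ring

lemma main_lemma (k : Nat) : ∀ (r c : Int), 0 ≤ r → 0 ≤ c →
    solve ((k : Int) + 1) r c = solve_alt ((k : Int) + 1) r c := by
  induction k with
  | zero =>
    intro r c hr hc
    rw [solve, solve_alt]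
    rw [PySem.List.pyRange_neg_one_eq_nil (by norm_num)]
    simp
    try omega
  | succ k ih =>
    intro r c hr hc
    push_cast
    have e1 : ((k : Int) + 1 + 1 - 1) = (k : Int) + 1 := by ring
    have e2 : ((k : Int) + 1).toNat = k + 1 := by omega
    have e3 : (2 * ((k : Int) + 1)).toNat = 2 * (k + 1) := by omega
    rw [solve, if_neg (by omega), if_neg (by omega : ¬ ((k:Int)+1+1 = 1)),
        if_neg (by omega : ¬ ((k:Int)+1+1 ≤ 1))]
    rw [solve_alt, if_neg (by omega)]
    rw [PySem.List.pyRange_neg_one_cons (by omega : (1:Int) < (k : Int) + 1 + 1)]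
    simp only [List.foldl_cons, e1, e2, e3]
    set h : Int := 2 ^ (k + 1) with hh
    have hpos : 0 < h := by positivity
    have hpow : (4 : Int) ^ (k + 1) = 2 ^ (2 * (k + 1)) := by rw [pow_mul]; norm_num
    have hstep : stepB (0, r, c) ((k : Int) + 1 + 1) =
        ((if c ≥ h then (if r ≥ h then (2:Int) else 0) + 1 else (if r ≥ h then (2:Int) else 0)) * 2 ^ (2 * (k + 1)),
         (if r ≥ h then r - h else r), (if c ≥ h then c - h else c)) := by
      simp only [stepB, e1, e2, ← hh]
      split_ifs <;> simp [hpow]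
    rw [hstep, foldl_stepB_shift]
    have hr' : (0:Int) ≤ (if r ≥ h then r - h else r) := by split_ifs <;> omega
    have hc' : (0:Int) ≤ (if c ≥ h then c - h else c) := by split_ifs <;> omega
    have halt : solve_alt ((k : Int) + 1) (if r ≥ h then r - h else r) (if c ≥ h then c - h else c) =
        ((PySem.List.pyRange ((k : Int) + 1) 1 (-1)).foldl stepB
            (0, (if r ≥ h then r - h else r), (if c ≥ h then c - h else c))).1 +
        ((PySem.List.pyRange ((k : Int) + 1) 1 (-1)).foldl stepB
            (0, (if r ≥ h then r - h else r), (if c ≥ h then c - h else c))).2.1 * 2 +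
        ((PySem.List.pyRange ((k : Int) + 1) 1 (-1)).foldl stepB
            (0, (if r ≥ h then r - h else r), (if c ≥ h then c - h else c))).2.2 := by
      rw [solve_alt, if_neg (by omega)]
    simp only [apply_ite (Prod.fst (α := Int) (β := Int)), apply_ite (Prod.snd (α := Int) (β := Int))]
    rw [ih _ _ hr' hc', halt]
    ring

-- ===== VERDICT =====
theorem solve_spec : Claim_equal_solve := by
  intro n r c _ hpre
  unfold Spec_solve
  by_cases hneg : r < 0 ∨ c < 0
  · rw [solve, solve_alt, if_pos hneg, if_pos hneg]
  · push Not at hneg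
    have hn : 1 ≤ n := by rcases hpre with h | h | h <;> omega
    have hk : n = ((n - 1).toNat : Int) + 1 := by omega
    rw [hk]
    exact main_lemma (n - 1).toNat r c hneg.1 hneg.2
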